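-- pv_equiv track=rewrite | github.com/OmerYilmazlar/Cassiopaean-Transcripts-Summaries | Tools/clean_and_export.py | insert_separators
-- ===== SOURCE A (Python) =====
-- def insert_separators(text: str) -> str:
--     lines, new = text.splitlines(), []
--     first_h = False
--     for line in lines:
--         if line.startswith("## "):
--             if not first_h:
--                 first_h = True
--             else:
--                 j = len(new)-1
--                 while j>=0 and new[j].strip()=="":
--                     j -= 1
--                 if j>=0 and new[j].strip()!="---":
--                     new.append("---")
--         new.append(line)
--     return "\n".join(new)+"\n"
-- ===== SOURCE B (Python) =====
-- def insert_separators(text: str) -> str: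
--     out = []
--     last = None  # stripped value of the last non-blank line appended (None if none yet)
--     first_h = False
--     for line in text.splitlines():
--         if line.startswith("## "):
--             if not first_h:
--                 first_h = True
--             elif last is not None and last != "---":
--                 out.append("---")
--         out.append(line)
--         s = line.strip()
--         if s:
--             last = s
--     return "\n".join(out) + "\n"
-- ===== Notes on version B (the rewrite author's own statement) =====
-- stated objective: simpler
-- what changed: The inner backward while-scan over the accumulated output (to find the last non-blank line) is replaced by a scalar state variable holding the stripped value of the last non-blank line appended, so B is a single forward pass with O(1) work per line.
import Mathlib
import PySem

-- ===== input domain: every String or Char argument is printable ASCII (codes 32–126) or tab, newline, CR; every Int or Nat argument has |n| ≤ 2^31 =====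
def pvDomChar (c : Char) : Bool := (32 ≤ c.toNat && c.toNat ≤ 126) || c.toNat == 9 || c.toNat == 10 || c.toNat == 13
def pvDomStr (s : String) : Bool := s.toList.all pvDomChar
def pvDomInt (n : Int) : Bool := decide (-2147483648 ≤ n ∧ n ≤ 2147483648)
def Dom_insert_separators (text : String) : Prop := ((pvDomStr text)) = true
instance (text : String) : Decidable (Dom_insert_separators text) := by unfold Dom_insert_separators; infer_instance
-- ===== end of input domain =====

-- B replaces A's backward while-scan of the accumulated lines with a scalar
-- "last non-blank stripped line" state, making it a plain single forward pass (simpler).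

-- ===== PORT A =====
-- the inner `while j>=0 and new[j].strip()==""` loop, scanning `new` backwards:
-- applied to new.reverse it returns the element at the first j (from the end) whose strip is non-blank
def pvBackScan : List String → Option String
  | [] => none
  | x :: rest => if PySem.Str.strip x == "" then pvBackScan rest else some x

def pvLoopA : List String → List String → Bool → List String
  | [], new, _ => new
  | line :: rest, new, first_h =>
    if PySem.Str.startswith line "## " then
      if !first_h then pvLoopA rest (new ++ [line]) true
      else
        match pvBackScan new.reverse with
        | some x =>
          if PySem.Str.strip x != "---" then pvLoopA rest (new ++ ["---", line]) first_h
          else pvLoopA rest (new ++ [line]) first_h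
        | none => pvLoopA rest (new ++ [line]) first_h
    else pvLoopA rest (new ++ [line]) first_h

def insert_separators (text : String) : String :=
  PySem.Str.join "\n" (pvLoopA (PySem.Str.splitlines text) [] false) ++ "\n"

-- ===== PORT B =====
def pvLoopB : List String → List String → Option String → Bool → List String
  | [], out, _, _ => out
  | line :: rest, out, last, first_h =>
    let out1 :=
      if PySem.Str.startswith line "## " then
        if !first_h then out
        else
          match last with
          | some t => if t != "---" then out ++ ["---"] else out
          | none => out
      else out
    let first_h1 := if PySem.Str.startswith line "## " then true else first_h
    let s := PySem.Str.strip line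
    let last1 := if s != "" then some s else last
    pvLoopB rest (out1 ++ [line]) last1 first_h1

def insert_separators_alt (text : String) : String :=
  PySem.Str.join "\n" (pvLoopB (PySem.Str.splitlines text) [] none false) ++ "\n"

-- ===== PRECONDITION & SPEC =====
def Spec_insert_separators (text : String) (out : String) : Prop := out = insert_separators_alt text
instance (text : String) (out : String) : Decidable (Spec_insert_separators text out) := by unfold Spec_insert_separators; infer_instance

-- ===== CLAIM (what is proved, stated in full; the proofs are below) =====
def Claim_equal_insert_separators : Prop := ∀ (text : String), Dom_insert_separators text → Spec_insert_separators text (insert_separators text)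

-- ===== LEMMAS AND PROOFS =====

-- a line starting with "## " strips to a non-blank string
lemma strip_header_ne {l : String} (h : PySem.Str.startswith l "## " = true) :
    (PySem.Str.strip l == "") = false := by
  rw [PySem.Str.startswith_eq, PySem.Chars.startswith_iff] at h
  obtain ⟨t, ht⟩ := h
  apply beq_eq_false_iff_ne.mpr
  intro hc
  have h2 : PySem.Chars.strip l.toList = [] := by
    have h3 := congrArg String.toList hc
    simpa [PySem.Str.strip] using h3
  have hmem : '#' ∈ l.toList := by rw [← ht]; simp
  have hall : ∀ x ∈ PySem.Chars.lstrip l.toList, PySem.Chars.isspace x = true := by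
    have h4 : PySem.Chars.rstrip (PySem.Chars.lstrip l.toList) = [] := h2
    unfold PySem.Chars.rstrip at h4
    rw [List.reverse_eq_nil_iff, List.dropWhile_eq_nil_iff] at h4
    intro x hx
    exact h4 x (List.mem_reverse.mpr hx)
  have hmem' : '#' ∈ PySem.Chars.lstrip l.toList ∨ '#' ∈ l.toList.takeWhile PySem.Chars.isspace := by
    rcases List.mem_append.mp (by rw [List.takeWhile_append_dropWhile]; exact hmem :
      '#' ∈ l.toList.takeWhile PySem.Chars.isspace ++ l.toList.dropWhile PySem.Chars.isspace) with h5 | h5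
    · exact Or.inr h5
    · exact Or.inl h5
  rcases hmem' with h5 | h5
  · have := hall _ h5; simp [PySem.Chars.isspace] at this
  · have := List.mem_takeWhile_imp h5; simp [PySem.Chars.isspace] at this

-- the state update of B preserves the invariant "last = strip of pvBackScan"
lemma inv_update (new : List String) (l : String) :
    (if (PySem.Str.strip l != "") = true then some (PySem.Str.strip l)
     else (pvBackScan new.reverse).map PySem.Str.strip) =
      (pvBackScan ((new ++ [l]).reverse)).map PySem.Str.strip := by
  rw [List.reverse_append]
  simp only [List.reverse_cons, List.reverse_nil, List.nil_append, List.singleton_append]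
  show _ = (pvBackScan (l :: new.reverse)).map PySem.Str.strip
  rw [pvBackScan]
  cases hb : (PySem.Str.strip l == "") <;> simp [hb, bne]

lemma loop_eq : ∀ (lines new : List String) (fh : Bool),
    pvLoopA lines new fh = pvLoopB lines new ((pvBackScan new.reverse).map PySem.Str.strip) fh := by
  intro lines
  induction lines with
  | nil => intro new fh; rfl
  | cons line rest ih =>
    intro new fh
    rw [pvLoopA, pvLoopB.eq_def]
    cases hsw : PySem.Str.startswith line "## " with
    | false =>
      simp only [hsw, if_false, Bool.false_eq_true]
      rw [ih, inv_update]
    | true =>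
      simp only [hsw, if_true]
      cases fh with
      | false => simp only [Bool.not_false, if_true]; rw [ih, inv_update]
      | true =>
        simp only [Bool.not_true, Bool.false_eq_true, if_false]
        cases hb : pvBackScan new.reverse with
        | none =>
          simp only [Option.map_none]
          rw [ih, ← inv_update, hb]
          simp only [Option.map_none]
        | some x =>
          simp only [Option.map_some]
          cases hx : (PySem.Str.strip x != "---") with
          | false =>
            simp only [Bool.false_eq_true, if_false]
            rw [ih, ← inv_update, hb]
            simp only [Option.map_some]
          | true =>
            simp only [if_true]
            have hcons : new ++ ["---", line] = (new ++ ["---"]) ++ [line] := by simp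
            have hne : (PySem.Str.strip line != "") = true := by
              simp [bne, strip_header_ne hsw]
            rw [hcons, ih, ← inv_update, hne]
            simp

-- ===== VERDICT (by name: the statement is the Claim_ definition above) =====
theorem insert_separators_spec : Claim_equal_insert_separators := by
  intro text _
  unfold Spec_insert_separators insert_separators insert_separators_alt
  have h := loop_eq (PySem.Str.splitlines text) [] false
  simp [pvBackScan] at h
  rw [h]
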